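-- pv_equiv track=rewrite | github.com/sammy0329/DataStructures_Study | sammy/230410_study/프로_155652_둘만의 암호.py | solution
-- ===== SOURCE A (Python) =====
-- def solution(s, skip, index):
--     answer = ''
--
--     for i in s:
--         cnt=0 # 변환 가능 횟수 카운팅
--         check=ord(i) # 초기 아스키코드값
--
--         while True:
--             check+=1 # 두의 알파벳으로 변경
--
--             if check>122: # 'z'를 넘어가면 'a'로 초기화
--                 check=97
--
--             if chr(check) not in skip: # skip에 해당 문자가 없다면 cnt 카운팅
--                 cnt+=1
--                 if cnt==index: # 인덱스만큼 돌았으면 answer에 해당 문자를 붙여주기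
--                     answer+=chr(check)
--                     break
--
--     return answer
-- ===== SOURCE B (Python) =====
-- def solution(s, skip, index):
--     skipset = set(skip)
--     allowed = [c for c in range(97, 123) if chr(c) not in skipset]
--     out = []
--     for ch in s:
--         x = ord(ch)
--         tail = [c for c in range(x + 1, 123) if chr(c) not in skipset]
--         if index <= len(tail):
--             out.append(chr(tail[index - 1]))
--         else:
--             out.append(chr(allowed[(index - len(tail) - 1) % len(allowed)]))
--     return ''.join(out)
-- ===== Notes on version B (the rewrite author's own statement) =====
-- stated objective: faster
-- what changed: Replaces A's per-character step-by-step walk (index*26 iterations per char) with a one-pass precomputed allowed-letter list and a modular-index jump per character.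
import Mathlib
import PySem

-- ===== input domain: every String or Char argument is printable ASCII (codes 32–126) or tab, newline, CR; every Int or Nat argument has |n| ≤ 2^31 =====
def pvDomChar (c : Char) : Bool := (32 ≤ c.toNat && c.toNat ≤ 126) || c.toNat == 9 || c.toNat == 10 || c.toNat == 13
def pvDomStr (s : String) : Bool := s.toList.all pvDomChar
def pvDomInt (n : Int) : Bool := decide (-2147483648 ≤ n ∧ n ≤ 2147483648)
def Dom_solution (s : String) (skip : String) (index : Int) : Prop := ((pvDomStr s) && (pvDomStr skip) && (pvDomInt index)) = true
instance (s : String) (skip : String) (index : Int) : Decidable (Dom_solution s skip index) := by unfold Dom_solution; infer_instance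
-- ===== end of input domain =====

-- B replaces A's per-character step-by-step walk (≈ index·26 steps per character) with a
-- precomputed allowed-letter list and a modular-index jump per character (return value only).

-- ===== PORT A =====
-- the inner 'while True' loop of A; fuel-based (the loop terminates exactly on Pre_ inputs;
-- the fuel chosen in 'solution' is proved sufficient there)
def loopA (sk : List Char) (index : Int) : Nat → Int → Int → Char
  | 0, _, _ => ' '
  | fuel+1, check, cnt =>
    let check1 : Int := check + 1
    let check2 : Int := if check1 > 122 then 97 else check1
    if sk.contains (Char.ofNat check2.toNat) = false then
      (if cnt + 1 = index then Char.ofNat check2.toNat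
       else loopA sk index fuel check2 (cnt + 1))
    else loopA sk index fuel check2 cnt

def solution (s : String) (skip : String) (index : Int) : String :=
  String.mk (s.toList.foldl
    (fun acc i => acc ++ [loopA skip.toList index (139 * (index.toNat + 1)) (i.toNat : Int) 0]) [])

-- ===== PORT B =====
def solution_alt (s : String) (skip : String) (index : Int) : String :=
  let sk := skip.toList
  let allowed := (List.range' 97 26).filter (fun c => !(sk.contains (Char.ofNat c)))
  String.mk (s.toList.map (fun ch =>
    let x := ch.toNat
    let tail := (List.range' (x + 1) (122 - x)).filter (fun c => !(sk.contains (Char.ofNat c)))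
    if index ≤ (tail.length : Int) then
      Char.ofNat ((PySem.List.pyGet? tail (index - 1)).getD 32)
    else
      Char.ofNat (allowed.getD
        ((PySem.Int.mod (index - (tail.length : Int) - 1) (allowed.length : Int)).toNat) 32)))

-- ===== PRECONDITION & SPEC =====
-- Pre_ is exactly A's halting set: A's while-loop diverges when index < 1 (cnt can never hit it),
-- and when every lowercase letter is in skip while some character of s needs more than its finite
-- climb to 'z' can supply; the empty s returns '' for any index.
def Pre_solution (s : String) (skip : String) (index : Int) : Prop :=
  s.toList = [] ∨
  (1 ≤ index ∧
    ((∃ c ∈ List.range' 97 26, skip.toList.contains (Char.ofNat c) = false) ∨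
     (∀ ch ∈ s.toList, index ≤
        (((List.range' (ch.toNat + 1) (122 - ch.toNat)).filter
            (fun c => !(skip.toList.contains (Char.ofNat c)))).length : Int))))
instance (s : String) (skip : String) (index : Int) : Decidable (Pre_solution s skip index) := by
  unfold Pre_solution; infer_instance

def pvWitness_solution : String × String × Int := ("ab", "b", 2)

def Spec_solution (s : String) (skip : String) (index : Int) (out : String) : Prop := out = solution_alt s skip index
instance (s : String) (skip : String) (index : Int) (out : String) : Decidable (Spec_solution s skip index out) := by unfold Spec_solution; infer_instance

-- ===== CLAIM (what is proved, stated in full; the proofs are below) =====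
def Claim_equal_solution : Prop := ∀ (s : String) (skip : String) (index : Int), Dom_solution s skip index → Pre_solution s skip index → Spec_solution s skip index (solution s skip index)

-- ===== LEMMAS AND PROOFS =====

-- character-wise specification used to relate the two ports
def nsB (sk : List Char) (c : Nat) : Bool := !(sk.contains (Char.ofNat c))
def TT (sk : List Char) (x : Nat) : List Nat := (List.range' (x + 1) (122 - x)).filter (nsB sk)
def LL (sk : List Char) : List Nat := (List.range' 97 26).filter (nsB sk)
def FF (sk : List Char) (x n : Nat) : Nat :=
  if n ≤ (TT sk x).length then (TT sk x).getD (n - 1) 32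
  else (LL sk).getD ((n - (TT sk x).length - 1) % (LL sk).length) 32
def distA (sk : List Char) (x : Nat) : Nat :=
  match TT sk x with
  | c :: _ => c - x
  | [] => (122 - x) + ((LL sk).headD 97 - 96)

lemma TT_mem {sk : List Char} {x c : Nat} (h : c ∈ TT sk x) : x + 1 ≤ c ∧ c ≤ 122 := by
  unfold TT at h
  have h' := List.mem_range'_1.mp (List.mem_of_mem_filter h)
  omega

lemma LL_mem {sk : List Char} {c : Nat} (h : c ∈ LL sk) : 97 ≤ c ∧ c ≤ 122 := by
  unfold LL at h
  have h' := List.mem_range'_1.mp (List.mem_of_mem_filter h)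
  omega

lemma TT_step {sk : List Char} {x : Nat} (h : x < 122) :
    TT sk x = if nsB sk (x + 1) then (x + 1) :: TT sk (x + 1) else TT sk (x + 1) := by
  unfold TT
  have h1 : 122 - x = (122 - (x + 1)) + 1 := by omega
  rw [h1, List.range'_succ, List.filter_cons]

lemma TT_empty {sk : List Char} {x : Nat} (h : 122 ≤ x) : TT sk x = [] := by
  unfold TT
  have h1 : 122 - x = 0 := by omega
  rw [h1]; rfl

lemma LL_eq (sk : List Char) :
    LL sk = if nsB sk 97 then 97 :: TT sk 97 else TT sk 97 := by
  unfold LL TT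
  rw [show (26 : Nat) = 25 + 1 by rfl, List.range'_succ, List.filter_cons]

lemma distA_pos {sk : List Char} {x : Nat} : 1 ≤ distA sk x := by
  unfold distA
  cases hT : TT sk x with
  | cons c t =>
    have := TT_mem (hT ▸ List.mem_cons_self ..)
    show 1 ≤ c - x
    omega
  | nil =>
    show 1 ≤ (122 - x) + ((LL sk).headD 97 - 96)
    cases hL : LL sk with
    | nil => simp
    | cons c t =>
      have := LL_mem (hL ▸ List.mem_cons_self ..)
      simp; omega

lemma distA_le {sk : List Char} {x : Nat} (hx : 9 ≤ x)
    (h : TT sk x ≠ [] ∨ LL sk ≠ []) : distA sk x ≤ 139 := by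
  unfold distA
  cases hT : TT sk x with
  | cons c t =>
    have := TT_mem (hT ▸ List.mem_cons_self ..)
    show c - x ≤ 139
    omega
  | nil =>
    show (122 - x) + ((LL sk).headD 97 - 96) ≤ 139
    cases hL : LL sk with
    | nil => simp [hT, hL] at h
    | cons c t =>
      have := LL_mem (hL ▸ List.mem_cons_self ..)
      simp; omega

lemma FF_step_skip {sk : List Char} {x n : Nat} (hx : x < 122) (hb : nsB sk (x + 1) = false) :
    FF sk x n = FF sk (x + 1) n := by
  simp only [FF, TT_step hx, hb]
  simp

lemma FF_count_one {sk : List Char} {x : Nat} (hx : x < 122) (hb : nsB sk (x + 1) = true) :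
    FF sk x 1 = x + 1 := by
  simp only [FF, TT_step hx, hb]
  simp

lemma FF_step_count {sk : List Char} {x n : Nat} (hx : x < 122) (hb : nsB sk (x + 1) = true)
    (hn : 2 ≤ n) : FF sk x n = FF sk (x + 1) (n - 1) := by
  simp only [FF, TT_step hx, hb, if_true, List.length_cons]
  by_cases hle : n ≤ (TT sk (x + 1)).length + 1
  · rw [if_pos hle, if_pos (by omega)]
    rw [show n - 1 = (n - 2) + 1 by omega, List.getD_cons_succ]
    congr 1
  · rw [if_neg hle, if_neg (by omega)]
    rw [show n - ((TT sk (x + 1)).length + 1) - 1 = n - 1 - (TT sk (x + 1)).length - 1 by omega]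

lemma distA_step_skip {sk : List Char} {x : Nat} (hx : x < 122) (hb : nsB sk (x + 1) = false) :
    distA sk (x + 1) + 1 = distA sk x := by
  have hT : TT sk x = TT sk (x + 1) := by rw [TT_step hx, hb]; simp
  unfold distA
  rw [hT]
  cases hT1 : TT sk (x + 1) with
  | cons c t =>
    have := TT_mem (hT1 ▸ List.mem_cons_self ..)
    show (c - (x + 1)) + 1 = c - x
    omega
  | nil =>
    show ((122 - (x + 1)) + ((LL sk).headD 97 - 96)) + 1 = (122 - x) + ((LL sk).headD 97 - 96)
    have hh : 97 ≤ (LL sk).headD 97 := by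
      cases hL : LL sk with
      | nil => simp
      | cons c t => have := LL_mem (hL ▸ List.mem_cons_self ..); simp; omega
    omega

lemma FF_wrap_skip {sk : List Char} {x n : Nat} (hx : 122 ≤ x) (hb : nsB sk 97 = false)
    (hL : LL sk ≠ []) (hn : 1 ≤ n) : FF sk x n = FF sk 97 n := by
  have hT97 : TT sk 97 = LL sk := by rw [LL_eq sk, hb]; simp
  have hm : 1 ≤ (LL sk).length := by
    cases hLc : LL sk with
    | nil => exact absurd hLc hL
    | cons c t => simp
  simp only [FF, TT_empty hx, hT97, List.length_nil]
  rw [if_neg (by omega)]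
  by_cases hle : n ≤ (LL sk).length
  · rw [if_pos hle, show n - 0 - 1 = n - 1 by omega, Nat.mod_eq_of_lt (by omega)]
  · rw [if_neg hle, show n - 0 - 1 = n - 1 by omega,
      Nat.mod_eq_sub_mod (by omega : (LL sk).length ≤ n - 1),
      show n - 1 - (LL sk).length = n - (LL sk).length - 1 by omega]

lemma FF_wrap_one {sk : List Char} {x : Nat} (hx : 122 ≤ x) (hb : nsB sk 97 = true) :
    FF sk x 1 = 97 := by
  have hLc : LL sk = 97 :: TT sk 97 := by rw [LL_eq sk, hb]; simp
  simp only [FF, TT_empty hx, List.length_nil]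
  rw [if_neg (by omega)]
  simp [hLc]

lemma FF_wrap_count {sk : List Char} {x n : Nat} (hx : 122 ≤ x) (hb : nsB sk 97 = true)
    (hn : 2 ≤ n) : FF sk x n = FF sk 97 (n - 1) := by
  have hLc : LL sk = 97 :: TT sk 97 := by rw [LL_eq sk, hb]; simp
  have hm : (LL sk).length = (TT sk 97).length + 1 := by rw [hLc]; simp
  simp only [FF, TT_empty hx, List.length_nil]
  rw [if_neg (by omega), show n - 0 - 1 = n - 1 by omega]
  by_cases hle : n ≤ (LL sk).length
  · rw [if_pos (by omega), Nat.mod_eq_of_lt (by omega), hLc,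
      show n - 1 = (n - 1 - 1) + 1 by omega, List.getD_cons_succ]
    congr 1
  · rw [if_neg (by omega),
      Nat.mod_eq_sub_mod (by omega : (LL sk).length ≤ n - 1),
      show n - 1 - (LL sk).length = n - 1 - (TT sk 97).length - 1 by omega]

lemma distA_wrap_skip {sk : List Char} {x : Nat} (hx : 122 ≤ x) (hb : nsB sk 97 = false)
    (hL : LL sk ≠ []) : distA sk 97 + 1 = distA sk x := by
  have hT97 : TT sk 97 = LL sk := by rw [LL_eq sk, hb]; simp
  unfold distA
  rw [TT_empty hx, hT97]
  cases hLc : LL sk with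
  | nil => exact absurd hLc hL
  | cons c t =>
    have hc := LL_mem (hLc ▸ List.mem_cons_self ..)
    have hc97 : c ≠ 97 := by
      intro h
      have : c ∈ LL sk := hLc ▸ List.mem_cons_self ..
      unfold LL at this
      have := List.of_mem_filter this
      rw [h] at this
      rw [hb] at this
      exact Bool.false_ne_true this
    show (c - 97) + 1 = (122 - x) + (List.headD (c :: t) 97 - 96)
    simp only [List.headD]
    omega

lemma loopA_spec (sk : List Char) (index : Int) :
    ∀ (fuel x : Nat) (cnt : Int) (n : Nat), 9 ≤ x → x ≤ 126 → 1 ≤ n →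
    index - cnt = (n : Int) →
    (LL sk ≠ [] ∨ n ≤ (TT sk x).length) →
    distA sk x + 139 * (n - 1) ≤ fuel →
    loopA sk index fuel (x : Int) cnt = Char.ofNat (FF sk x n) := by
  intro fuel
  induction fuel with
  | zero =>
    intro x cnt n hx9 hx126 hn heq hinv hfuel
    have := distA_pos (sk := sk) (x := x)
    omega
  | succ fuel ih =>
    intro x cnt n hx9 hx126 hn heq hinv hfuel
    have hd1 := distA_pos (sk := sk) (x := x)
    rcases Nat.lt_or_ge x 122 with hxlt | hxge
    · -- no wrap: the considered code is x + 1
      have hif : (if ((x : Int) + 1) > 122 then (97 : Int) else (x : Int) + 1) = ((x + 1 : Nat) : Int) := by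
        rw [if_neg (by omega)]; push_cast; ring
      have htn : ((x + 1 : Nat) : Int).toNat = x + 1 := by omega
      by_cases hcon : sk.contains (Char.ofNat (x + 1)) = false
      · have hb : nsB sk (x + 1) = true := by unfold nsB; rw [hcon]; rfl
        by_cases hhit : cnt + 1 = index
        · have hn1 : n = 1 := by omega
          simp only [loopA, hif, htn, hcon, hhit, if_pos]
          rw [hn1, FF_count_one hxlt hb]
        · have hn2 : 2 ≤ n := by
            omega
          have hinv' : LL sk ≠ [] ∨ n - 1 ≤ (TT sk (x + 1)).length := by
            rcases hinv with h | h
            · exact Or.inl h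
            · right
              rw [TT_step hxlt, hb] at h
              simp at h
              omega
          have hTne : TT sk (x + 1) ≠ [] ∨ LL sk ≠ [] := by
            rcases hinv' with h | h
            · exact Or.inr h
            · left
              intro hnil
              rw [hnil] at h
              simp at h
              omega
          have hdle := distA_le (sk := sk) (x := x + 1) (by omega) hTne
          rw [FF_step_count hxlt hb hn2]
          simp only [loopA, hif, htn, hcon, hhit, if_pos]
          exact ih (x + 1) (cnt + 1) (n - 1) (by omega) (by omega) (by omega)
            (by omega) hinv' (by omega)
      · have hb : nsB sk (x + 1) = false := by simp [nsB] at hcon ⊢; exact hcon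
        have hTeq : TT sk x = TT sk (x + 1) := by rw [TT_step hxlt, hb]; simp
        have hdstep := distA_step_skip hxlt hb
        rw [FF_step_skip hxlt hb]
        simp only [loopA, hif, htn, hcon]
        exact ih (x + 1) cnt n (by omega) (by omega) hn heq
          (by rw [← hTeq]; exact hinv) (by omega)
    · -- wrap: the considered code is 97
      have hif : (if ((x : Int) + 1) > 122 then (97 : Int) else (x : Int) + 1) = ((97 : Nat) : Int) := by
        rw [if_pos (by omega)]; rfl
      have htn : ((97 : Nat) : Int).toNat = 97 := by omega
      have hL : LL sk ≠ [] := by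
        rcases hinv with h | h
        · exact h
        · rw [TT_empty hxge] at h; simp at h; omega
      have hdle := distA_le (sk := sk) (x := 97) (by omega) (Or.inr hL)
      by_cases hcon : sk.contains (Char.ofNat 97) = false
      · have hb : nsB sk 97 = true := by unfold nsB; rw [hcon]; rfl
        by_cases hhit : cnt + 1 = index
        · have hn1 : n = 1 := by omega
          simp only [loopA, hif, htn, hcon, hhit, if_pos]
          rw [hn1, FF_wrap_one hxge hb]
        · have hn2 : 2 ≤ n := by
            omega
          rw [FF_wrap_count hxge hb hn2]
          simp only [loopA, hif, htn, hcon, hhit, if_pos]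
          exact ih 97 (cnt + 1) (n - 1) (by omega) (by omega) (by omega)
            (by omega) (Or.inl hL) (by omega)
      · have hb : nsB sk 97 = false := by simp [nsB] at hcon ⊢; exact hcon
        have hdstep := distA_wrap_skip hxge hb hL
        rw [FF_wrap_skip hxge hb hL hn]
        simp only [loopA, hif, htn, hcon]
        exact ih 97 cnt n (by omega) (by omega) hn heq (Or.inl hL) (by omega)

lemma foldl_append_map {α β : Type} (g : α → β) :
    ∀ (l : List α) (acc : List β), l.foldl (fun acc i => acc ++ [g i]) acc = acc ++ l.map g := by
  intro l
  induction l with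
  | nil => intro acc; simp
  | cons a t ih => intro acc; simp [ih]

lemma altBody_eq (sk : List Char) (index : Int) (x n : Nat) (hn1 : 1 ≤ n)
    (hidx : index = (n : Int)) (hinv : LL sk ≠ [] ∨ n ≤ (TT sk x).length) :
    (if index ≤ ((TT sk x).length : Int) then
        Char.ofNat ((PySem.List.pyGet? (TT sk x) (index - 1)).getD 32)
      else
        Char.ofNat ((LL sk).getD
          ((PySem.Int.mod (index - ((TT sk x).length : Int) - 1) ((LL sk).length : Int)).toNat) 32))
    = Char.ofNat (FF sk x n) := by
  subst hidx
  by_cases hle : n ≤ (TT sk x).length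
  · rw [if_pos (by exact_mod_cast hle)]
    rw [show ((n : Int) - 1) = ((n - 1 : Nat) : Int) by omega]
    rw [PySem.List.pyGet?_natCast, ← List.getD_eq_getElem?_getD]
    simp only [FF, if_pos hle]
  · rw [if_neg (by exact_mod_cast hle)]
    have hL : LL sk ≠ [] := by
      rcases hinv with h | h
      · exact h
      · exact absurd h hle
    have hm : 1 ≤ (LL sk).length := by
      cases hLc : LL sk with
      | nil => exact absurd hLc hL
      | cons c t => simp
    rw [show ((n : Int) - ((TT sk x).length : Int) - 1) = ((n - (TT sk x).length - 1 : Nat) : Int) by omega]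
    rw [PySem.Int.mod_natCast]
    rw [show ((((n - (TT sk x).length - 1) % (LL sk).length : Nat)) : Int).toNat
        = (n - (TT sk x).length - 1) % (LL sk).length by omega]
    simp only [FF, if_neg hle]

theorem solution_spec : Claim_equal_solution := by
  unfold Claim_equal_solution
  intro s skip index hdom hpre
  unfold Spec_solution solution solution_alt
  rcases hpre with hnil | ⟨hidx, hor⟩
  · rw [hnil]; rfl
  · have hTTdef : ∀ y : Nat,
        (List.range' (y + 1) (122 - y)).filter (fun c => !(skip.toList.contains (Char.ofNat c)))
          = TT skip.toList y := fun _ => rfl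
    have hLLdef :
        (List.range' 97 26).filter (fun c => !(skip.toList.contains (Char.ofNat c)))
          = LL skip.toList := rfl
    have hn1 : 1 ≤ index.toNat := by omega
    have hidxn : index = (index.toNat : Int) := by omega
    have hinv : ∀ ch ∈ s.toList,
        (LL skip.toList ≠ [] ∨ index.toNat ≤ (TT skip.toList ch.toNat).length) := by
      intro ch hch
      rcases hor with ⟨c, hc, hcf⟩ | hall
      · left
        intro hLnil
        have hns : nsB skip.toList c = true := by unfold nsB; rw [hcf]; rfl
        have hmem : c ∈ LL skip.toList := List.mem_filter.mpr ⟨hc, hns⟩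
        rw [hLnil] at hmem
        simp at hmem
      · right
        have h := hall ch hch
        rw [hTTdef] at h
        omega
    have hdoms : ∀ ch ∈ s.toList, 9 ≤ ch.toNat ∧ ch.toNat ≤ 126 := by
      unfold Dom_solution pvDomStr at hdom
      simp only [Bool.and_eq_true, List.all_eq_true] at hdom
      intro ch hch
      have h := hdom.1.1 ch hch
      simp only [pvDomChar, Bool.or_eq_true, Bool.and_eq_true, decide_eq_true_eq,
        beq_iff_eq] at h
      omega
    simp only []
    rw [foldl_append_map (fun i => loopA skip.toList index (139 * (index.toNat + 1)) (i.toNat : Int) 0)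
        s.toList []]
    rw [List.nil_append]
    congr 1
    apply List.map_congr_left
    intro ch hch
    have hb := hdoms ch hch
    have hiv := hinv ch hch
    have hTne : TT skip.toList ch.toNat ≠ [] ∨ LL skip.toList ≠ [] := by
      rcases hiv with h | h
      · exact Or.inr h
      · left
        intro hnil
        rw [hnil] at h
        simp at h
        omega
    have hdle := distA_le (sk := skip.toList) (x := ch.toNat) (by omega) hTne
    rw [hTTdef, hLLdef, altBody_eq skip.toList index ch.toNat index.toNat hn1 hidxn hiv]
    exact loopA_spec skip.toList index (139 * (index.toNat + 1)) ch.toNat 0 index.toNat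
      (by omega) (by omega) hn1 (by omega) hiv (by omega)
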